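-- pv_equiv track=rewrite | github.com/javiergbaroja/PathoDB | etl/etl copy.py | resolve_probe_for_scan
-- ===== SOURCE A (Python) =====
-- def extract_year(b_case: str) -> int:
--     """
--     Extract the year from a b_case string.
--     Handles formats: B2004.123, B2012.456, B2018.789
--     Returns 0 if not parseable.
--     """
--     import re
--     m = re.search(r'B(\d{4})\.', b_case or "", re.IGNORECASE)
--     return int(m.group(1)) if m else 0
--
-- def resolve_probe_for_scan(
--     b_case: str,
--     probe_raw: str,
--     submission_map: dict,
--     probe_map: dict,
--     sub_to_probes: dict,
-- ) -> tuple: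
--     """
--     Resolve a scan row to a (sub_id, probe_id) pair using era-aware logic.
--
--     Three strategies are tried in order, falling back to the next if no match:
--
--     Strategy 1 — Pre-2011 (b_case is a submission ID):
--         b_case → submission, then probe from submission context.
--         Used for year <= 2011.
--
--     Strategy 2 — 2011-2017 (b_case IS the probe's lis_probe_id):
--         b_case → lis_probe_id directly in probe_map.
--         Used for year 2011-2017.
--
--     Strategy 3 — Post-2017 (composite: b_case + zero-padded probe numeral):
--         f"{b_case}/{int(probe_raw):03d}" → lis_probe_id.
--         Used for year >= 2017.
--
--     Boundary years 2011 and 2017 are handled by trying both adjacent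
--     strategies, so mid-year format changes are covered automatically.
--
--     Returns (sub_id, probe_id) or (None, None) if no strategy succeeds.
--     """
--     year = extract_year(b_case)
--
--     # ── Strategy 1: b_case matches submission ID ──────────────────────────────
--     def try_submission_match():
--         sub_id = submission_map.get(b_case)
--         if sub_id is None:
--             return None, None
--         # If probe_raw given, look for it within this submission
--         if probe_raw:
--             pid = probe_map.get((b_case, probe_raw))
--             if pid:
--                 return sub_id, pid
--             # Case-insensitive fallback
--             for (sk, pk), pid in probe_map.items():
--                 if sk == b_case and pk.upper() == probe_raw.upper():
--                     return sub_id, pid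
--         # No probe_raw or not found — auto-resolve if only one probe
--         probe_ids = sub_to_probes.get(sub_id, [])
--         if len(probe_ids) == 1:
--             return sub_id, probe_ids[0]
--         return sub_id, None  # sub found but probe ambiguous
--
--     # ── Strategy 2: b_case matches lis_probe_id directly ─────────────────────
--     def try_probe_direct_match():
--         # Search probe_map for any entry whose lis_probe_id == b_case
--         for (sk, pk), pid in probe_map.items():
--             if pk == b_case:
--                 return submission_map.get(sk), pid
--         return None, None
--
--     # ── Strategy 3: composite b_case/NNN matches lis_probe_id ────────────────
--     def try_composite_match():
--         if not probe_raw: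
--             return None, None
--         try:
--             padded = f"{int(probe_raw):03d}"
--         except (ValueError, TypeError):
--             return None, None
--         composite = f"{b_case}/{padded}"
--         for (sk, pk), pid in probe_map.items():
--             if pk == composite:
--                 return submission_map.get(sk), pid
--         return None, None
--
--     # ── Try strategies based on era, with overlap at boundaries ──────────────
--     if year <= 2011:
--         strategies = [try_submission_match, try_probe_direct_match]
--     elif year <= 2017:
--         strategies = [try_probe_direct_match, try_submission_match, try_composite_match]
--     else:
--         strategies = [try_composite_match, try_probe_direct_match]
--
--     for strategy in strategies:
--         sub_id, probe_id = strategy()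
--         if probe_id is not None:
--             return sub_id, probe_id
--
--     # Nothing worked — return sub_id only if we at least found the submission
--     sub_id = submission_map.get(b_case)
--     return sub_id, None
-- ===== SOURCE B (Python) =====
-- def extract_year(b_case: str) -> int:
--     import re
--     m = re.search(r'B(\d{4})\.', b_case or "", re.IGNORECASE)
--     return int(m.group(1)) if m else 0
--
-- def resolve_probe_for_scan(
--     b_case: str,
--     probe_raw: str,
--     submission_map: dict,
--     probe_map: dict,
--     sub_to_probes: dict,
-- ) -> tuple:
--     """One fused pass over probe_map collects the first match for each of the
--     four lookups (direct, exact, case-insensitive, composite); the era logic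
--     then becomes a pure or-chain over the three candidate results."""
--     year = extract_year(b_case)
--     sub_id0 = submission_map.get(b_case)
--
--     composite = None
--     if probe_raw:
--         try:
--             composite = f"{b_case}/{int(probe_raw):03d}"
--         except (ValueError, TypeError):
--             composite = None
--     pru = probe_raw.upper()
--
--     direct = exact = ci = comp = None
--     for (sk, pk), pid in probe_map.items():
--         if direct is None and pk == b_case:
--             direct = (sk, pid)
--         if exact is None and sk == b_case and pk == probe_raw:
--             exact = pid
--         if ci is None and sk == b_case and pk.upper() == pru:
--             ci = pid
--         if comp is None and composite is not None and pk == composite: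
--             comp = (sk, pid)
--
--     # submission-strategy candidate: probe = exact (if truthy), else
--     # case-insensitive, else the submission's unique probe
--     if sub_id0 is None:
--         hS = None
--     else:
--         p = (exact if exact else ci) if probe_raw else None
--         if p is None:
--             ids = sub_to_probes.get(sub_id0, [])
--             if len(ids) == 1:
--                 p = ids[0]
--         hS = (sub_id0, p) if p is not None else None
--     hD = (submission_map.get(direct[0]), direct[1]) if direct is not None else None
--     hC = (submission_map.get(comp[0]), comp[1]) if comp is not None else None
--
--     if year <= 2011:
--         hit = hS if hS is not None else hD
--     elif year <= 2017:
--         hit = hD if hD is not None else (hS if hS is not None else hC)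
--     else:
--         hit = hC if hC is not None else hD
--
--     return hit if hit is not None else (sub_id0, None)
-- ===== Notes on version B (the rewrite author's own statement) =====
-- stated objective: alternative
-- what changed: A tries era-ordered strategy closures, each doing its own linear scan of probe_map; B makes ONE fused pass over probe_map collecting the first match of all four lookups (direct, exact, case-insensitive, composite) and then selects the era's answer by a pure or-chain over the three precomputed candidates.
import Mathlib
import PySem

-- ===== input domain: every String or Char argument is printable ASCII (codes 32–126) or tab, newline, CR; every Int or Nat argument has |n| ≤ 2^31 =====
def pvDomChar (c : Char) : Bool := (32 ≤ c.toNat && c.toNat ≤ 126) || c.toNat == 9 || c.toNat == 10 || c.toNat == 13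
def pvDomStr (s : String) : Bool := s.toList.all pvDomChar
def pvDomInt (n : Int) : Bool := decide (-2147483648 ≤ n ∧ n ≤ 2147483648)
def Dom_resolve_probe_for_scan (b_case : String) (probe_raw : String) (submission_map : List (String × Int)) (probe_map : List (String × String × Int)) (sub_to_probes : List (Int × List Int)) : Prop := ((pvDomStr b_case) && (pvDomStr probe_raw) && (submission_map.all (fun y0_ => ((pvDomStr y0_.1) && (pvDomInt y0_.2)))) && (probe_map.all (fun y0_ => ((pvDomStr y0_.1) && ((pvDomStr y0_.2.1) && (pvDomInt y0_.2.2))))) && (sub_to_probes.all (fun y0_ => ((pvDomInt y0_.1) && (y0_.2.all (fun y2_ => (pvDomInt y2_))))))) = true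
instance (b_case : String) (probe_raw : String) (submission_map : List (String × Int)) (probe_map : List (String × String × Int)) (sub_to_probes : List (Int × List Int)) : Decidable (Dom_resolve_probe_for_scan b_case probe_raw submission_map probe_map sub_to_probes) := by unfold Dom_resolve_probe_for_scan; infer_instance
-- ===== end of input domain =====

-- B fuses A's per-strategy linear scans into ONE pass over probe_map that collects the
-- first match of each of the four lookups, then picks the era's answer by an or-chain
-- over the three candidates (objective: alternative decomposition; same asymptotics).


-- ===== SHARED HELPERS (module-level Python helpers / built-ins both versions call) =====

-- re.search(r'B(\d{4})\.', s, re.IGNORECASE): leftmost position where 'B'/'b' is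
-- followed by exactly four ASCII digits and a '.'; int of the four digits, else 0.
def eyDigits? (cs : List Char) : Option Int :=
  match cs with
  | d1 :: d2 :: d3 :: d4 :: '.' :: _ =>
    if PySem.Chars.isdigit d1 && PySem.Chars.isdigit d2 && PySem.Chars.isdigit d3 && PySem.Chars.isdigit d4 then
      some (1000 * ((d1.toNat : Int) - 48) + 100 * ((d2.toNat : Int) - 48) + 10 * ((d3.toNat : Int) - 48) + ((d4.toNat : Int) - 48))
    else none
  | _ => none

def eyScan : List Char → Int
  | [] => 0
  | c :: rest =>
    if c == 'B' || c == 'b' then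
      match eyDigits? rest with
      | some y => y
      | none => eyScan rest
    else eyScan rest

def extract_year (b_case : String) : Int := eyScan b_case.toList

-- dict.get on an association list (first match)
def lookupSub (m : List (String × Int)) (k : String) : Option Int :=
  (m.find? (fun e => e.1 == k)).map (·.2)

-- f"{n:03d}" : zero-pad to total width 3 (sign counts toward the width)
def padZeros (w : Nat) (ds : List Char) : List Char := List.replicate (w - ds.length) '0' ++ ds

def pad3 (n : Int) : String :=
  match PySem.Int.toChars n with
  | '-' :: ds => String.ofList ('-' :: padZeros 2 ds)
  | ds => String.ofList (padZeros 3 ds)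

-- ===== PORT A =====

-- the era-dispatch loop: first strategy result whose probe component is not None, else fallback
def firstHit : List (Option Int × Option Int) → (Option Int × Option Int) → Option Int × Option Int
  | [], fb => fb
  | r :: rest, fb => if r.2.isSome then r else firstHit rest fb

-- Strategy 1: b_case matches a submission ID
def aSubMatch (b_case : String) (probe_raw : String) (submission_map : List (String × Int)) (probe_map : List (String × String × Int)) (sub_to_probes : List (Int × List Int)) : Option Int × Option Int :=
  match lookupSub submission_map b_case with
  | none => (none, none)
  | some sub_id =>
    let auto :=
      let probe_ids := (((sub_to_probes.find? (fun e => e.1 == sub_id)).map (·.2)).getD [])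
      if probe_ids.length == 1 then (some sub_id, probe_ids.head?) else (some sub_id, none)
    if probe_raw == "" then auto
    else
      let fb :=  -- case-insensitive linear scan over probe_map
        match probe_map.find? (fun e => e.1 == b_case && PySem.Str.upper e.2.1 == PySem.Str.upper probe_raw) with
        | some e => (some sub_id, some e.2.2)
        | none => auto
      match probe_map.find? (fun e => e.1 == b_case && e.2.1 == probe_raw) with
      | some e => if e.2.2 ≠ 0 then (some sub_id, some e.2.2) else fb
      | none => fb

-- Strategy 2: linear scan for an entry whose lis_probe_id equals b_case
def aDirect (b_case : String) (submission_map : List (String × Int)) (probe_map : List (String × String × Int)) : Option Int × Option Int :=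
  match probe_map.find? (fun e => e.2.1 == b_case) with
  | some e => (lookupSub submission_map e.1, some e.2.2)
  | none => (none, none)

-- Strategy 3: linear scan for the composite id b_case/NNN
def aComposite (b_case : String) (probe_raw : String) (submission_map : List (String × Int)) (probe_map : List (String × String × Int)) : Option Int × Option Int :=
  if probe_raw == "" then (none, none)
  else
    match PySem.Int.ofStr? probe_raw with
    | none => (none, none)
    | some n =>
      let composite := b_case ++ "/" ++ pad3 n
      match probe_map.find? (fun e => e.2.1 == composite) with
      | some e => (lookupSub submission_map e.1, some e.2.2)
      | none => (none, none)

def resolve_probe_for_scan (b_case : String) (probe_raw : String) (submission_map : List (String × Int)) (probe_map : List (String × String × Int)) (sub_to_probes : List (Int × List Int)) : Option Int × Option Int :=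
  let year := extract_year b_case
  let strategies :=
    if year ≤ 2011 then
      [aSubMatch b_case probe_raw submission_map probe_map sub_to_probes,
       aDirect b_case submission_map probe_map]
    else if year ≤ 2017 then
      [aDirect b_case submission_map probe_map,
       aSubMatch b_case probe_raw submission_map probe_map sub_to_probes,
       aComposite b_case probe_raw submission_map probe_map]
    else
      [aComposite b_case probe_raw submission_map probe_map,
       aDirect b_case submission_map probe_map]
  firstHit strategies (lookupSub submission_map b_case, none)

-- ===== PORT B =====

-- 'composite is not None and pk == composite'
def compMatch (comp? : Option String) (pk : String) : Bool :=
  match comp? with | some c => pk == c | none => false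

-- the fused pass: first match for each of the four lookups, kept as four Options
-- ('o.or (if pred then some v else none)' is Source B's 'if o is None and pred: o = v')
def bScan (b_case probe_raw : String) (comp? : Option String) (probe_map : List (String × String × Int)) :
    Option (String × Int) × Option Int × Option Int × Option (String × Int) :=
  probe_map.foldl (fun st e =>
    (st.1.or (if e.2.1 == b_case then some (e.1, e.2.2) else none),
     st.2.1.or (if e.1 == b_case && e.2.1 == probe_raw then some e.2.2 else none),
     st.2.2.1.or (if e.1 == b_case && PySem.Str.upper e.2.1 == PySem.Str.upper probe_raw then some e.2.2 else none),
     st.2.2.2.or (if compMatch comp? e.2.1 then some (e.1, e.2.2) else none)))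
    (none, none, none, none)

def resolve_probe_for_scan_alt (b_case : String) (probe_raw : String) (submission_map : List (String × Int)) (probe_map : List (String × String × Int)) (sub_to_probes : List (Int × List Int)) : Option Int × Option Int :=
  let year := extract_year b_case
  let sub_id0 := lookupSub submission_map b_case
  let comp? : Option String :=
    if probe_raw == "" then none
    else (PySem.Int.ofStr? probe_raw).map (fun n => b_case ++ "/" ++ pad3 n)
  let st := bScan b_case probe_raw comp? probe_map
  -- submission-strategy candidate: probe = exact (if truthy), else case-insensitive, else unique probe
  let hS : Option (Option Int × Option Int) :=
    match sub_id0 with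
    | none => none
    | some s =>
      let p1 : Option Int :=
        if probe_raw == "" then none
        else match st.2.1 with
             | some v => if v ≠ 0 then some v else st.2.2.1
             | none => st.2.2.1
      let p : Option Int :=
        match p1 with
        | none =>
          let ids := (((sub_to_probes.find? (fun e => e.1 == s)).map (·.2)).getD [])
          if ids.length == 1 then ids.head? else none
        | some v => some v
      match p with
      | some pid => some (some s, some pid)
      | none => none
  let hD := st.1.map (fun e => (lookupSub submission_map e.1, some e.2))
  let hC := st.2.2.2.map (fun e => (lookupSub submission_map e.1, some e.2))
  let hit :=
    if year ≤ 2011 then hS.or hD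
    else if year ≤ 2017 then hD.or (hS.or hC)
    else hC.or hD
  hit.getD (sub_id0, none)

-- ===== PRECONDITION & SPEC =====
def Spec_resolve_probe_for_scan (b_case : String) (probe_raw : String) (submission_map : List (String × Int)) (probe_map : List (String × String × Int)) (sub_to_probes : List (Int × List Int)) (out : Option Int × Option Int) : Prop := out = resolve_probe_for_scan_alt b_case probe_raw submission_map probe_map sub_to_probes
instance (b_case : String) (probe_raw : String) (submission_map : List (String × Int)) (probe_map : List (String × String × Int)) (sub_to_probes : List (Int × List Int)) (out : Option Int × Option Int) : Decidable (Spec_resolve_probe_for_scan b_case probe_raw submission_map probe_map sub_to_probes out) := by unfold Spec_resolve_probe_for_scan; infer_instance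

-- ===== CLAIM (what is proved, stated in full; the proofs are below) =====
def Claim_equal_resolve_probe_for_scan : Prop := ∀ (b_case : String) (probe_raw : String) (submission_map : List (String × Int)) (probe_map : List (String × String × Int)) (sub_to_probes : List (Int × List Int)), Dom_resolve_probe_for_scan b_case probe_raw submission_map probe_map sub_to_probes → Spec_resolve_probe_for_scan b_case probe_raw submission_map probe_map sub_to_probes (resolve_probe_for_scan b_case probe_raw submission_map probe_map sub_to_probes)

-- ===== LEMMAS AND PROOFS =====

-- a first-match accumulator fold computes find?
lemma find?_false {α : Type} (l : List α) : l.find? (fun _ => false) = none := by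
  induction l with
  | nil => rfl
  | cons a l ih => simp [ih]

lemma bScan_go (b_case probe_raw : String) (comp? : Option String) (l : List (String × String × Int))
    (s1 : Option (String × Int)) (s2 s3 : Option Int) (s4 : Option (String × Int)) :
    l.foldl (fun st e =>
      (st.1.or (if e.2.1 == b_case then some (e.1, e.2.2) else none),
       st.2.1.or (if e.1 == b_case && e.2.1 == probe_raw then some e.2.2 else none),
       st.2.2.1.or (if e.1 == b_case && PySem.Str.upper e.2.1 == PySem.Str.upper probe_raw then some e.2.2 else none),
       st.2.2.2.or (if compMatch comp? e.2.1 then some (e.1, e.2.2) else none)))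
      (s1, s2, s3, s4)
    = (s1.or ((l.find? (fun e => e.2.1 == b_case)).map (fun e => (e.1, e.2.2))),
       s2.or ((l.find? (fun e => e.1 == b_case && e.2.1 == probe_raw)).map (·.2.2)),
       s3.or ((l.find? (fun e => e.1 == b_case && PySem.Str.upper e.2.1 == PySem.Str.upper probe_raw)).map (·.2.2)),
       s4.or ((l.find? (fun e => compMatch comp? e.2.1)).map (fun e => (e.1, e.2.2)))) := by
  induction l generalizing s1 s2 s3 s4 with
  | nil => simp
  | cons a l ih =>
    simp only [List.foldl_cons, ih, List.find?_cons]
    by_cases h1 : (a.2.1 == b_case) = true <;>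
    by_cases h2 : (a.1 == b_case && a.2.1 == probe_raw) = true <;>
    by_cases h3 : (a.1 == b_case && PySem.Str.upper a.2.1 == PySem.Str.upper probe_raw) = true <;>
    by_cases h4 : compMatch comp? a.2.1 = true <;>
    simp [h1, h2, h3, h4]

lemma bScan_eq (b_case probe_raw : String) (comp? : Option String) (probe_map : List (String × String × Int)) :
    bScan b_case probe_raw comp? probe_map =
      ((probe_map.find? (fun e => e.2.1 == b_case)).map (fun e => (e.1, e.2.2)),
       (probe_map.find? (fun e => e.1 == b_case && e.2.1 == probe_raw)).map (·.2.2),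
       (probe_map.find? (fun e => e.1 == b_case && PySem.Str.upper e.2.1 == PySem.Str.upper probe_raw)).map (·.2.2),
       (probe_map.find? (fun e => compMatch comp? e.2.1)).map (fun e => (e.1, e.2.2))) := by
  unfold bScan
  rw [bScan_go]
  simp

-- ===== VERDICT (by name: the statement is the Claim_ definition above) =====
lemma aDirect_eq (b_case : String) (submission_map : List (String × Int)) (probe_map : List (String × String × Int)) :
    aDirect b_case submission_map probe_map
      = (((probe_map.find? (fun e => e.2.1 == b_case)).map (fun e => (e.1, e.2.2))).map
          (fun e => (lookupSub submission_map e.1, some e.2))).getD (none, none) := by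
  unfold aDirect
  cases probe_map.find? (fun e => e.2.1 == b_case) <;> rfl

lemma aComposite_eq (b_case probe_raw : String) (submission_map : List (String × Int)) (probe_map : List (String × String × Int)) :
    aComposite b_case probe_raw submission_map probe_map
      = (((probe_map.find? (fun e => compMatch
            (if probe_raw == "" then none
             else (PySem.Int.ofStr? probe_raw).map (fun n => b_case ++ "/" ++ pad3 n)) e.2.1)).map (fun e => (e.1, e.2.2))).map
          (fun e => (lookupSub submission_map e.1, some e.2))).getD (none, none) := by
  unfold aComposite
  by_cases hpr : (probe_raw == "") = true
  · simp [hpr, compMatch, find?_false]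
  · simp only [hpr, Bool.false_eq_true, if_false]
    cases hn : PySem.Int.ofStr? probe_raw with
    | none => simp [compMatch, find?_false]
    | some n =>
      simp only [Option.map_some]
      have hp : (fun (e : String × String × Int) => compMatch (some (b_case ++ "/" ++ pad3 n)) e.2.1)
          = (fun (e : String × String × Int) => e.2.1 == b_case ++ "/" ++ pad3 n) := rfl
      rw [hp]
      cases probe_map.find? (fun (e : String × String × Int) => e.2.1 == b_case ++ "/" ++ pad3 n) <;> rfl

-- the submission strategy as an optional candidate (probe component always `some` when present)
def candS (b_case probe_raw : String) (submission_map : List (String × Int)) (probe_map : List (String × String × Int)) (sub_to_probes : List (Int × List Int)) : Option (Option Int × Option Int) :=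
  match lookupSub submission_map b_case with
  | none => none
  | some s =>
    let p1 : Option Int :=
      if probe_raw == "" then none
      else match (probe_map.find? (fun e => e.1 == b_case && e.2.1 == probe_raw)).map (·.2.2) with
           | some v => if v ≠ 0 then some v else (probe_map.find? (fun e => e.1 == b_case && PySem.Str.upper e.2.1 == PySem.Str.upper probe_raw)).map (·.2.2)
           | none => (probe_map.find? (fun e => e.1 == b_case && PySem.Str.upper e.2.1 == PySem.Str.upper probe_raw)).map (·.2.2)
    let p : Option Int :=
      match p1 with
      | none =>
        let ids := (((sub_to_probes.find? (fun e => e.1 == s)).map (·.2)).getD [])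
        if ids.length == 1 then ids.head? else none
      | some v => some v
    match p with
    | some pid => some (some s, some pid)
    | none => none

lemma aSubMatch_eq_candS (b_case probe_raw : String) (submission_map : List (String × Int)) (probe_map : List (String × String × Int)) (sub_to_probes : List (Int × List Int)) :
    aSubMatch b_case probe_raw submission_map probe_map sub_to_probes
      = (candS b_case probe_raw submission_map probe_map sub_to_probes).getD (lookupSub submission_map b_case, none) := by
  unfold aSubMatch candS
  cases hs : lookupSub submission_map b_case with
  | none => rfl
  | some s =>
    simp only
    by_cases hpr : (probe_raw == "") = true
    · simp only [hpr, if_true]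
      cases hids : (((sub_to_probes.find? (fun e => e.1 == s)).map (·.2)).getD []) with
      | nil => simp
      | cons a t => cases t <;> simp
    · simp only [hpr, Bool.false_eq_true, if_false]
      cases hE : probe_map.find? (fun e => e.1 == b_case && e.2.1 == probe_raw) with
      | some e =>
        simp only [Option.map_some]
        by_cases hz : e.2.2 ≠ 0
        · simp [hz]
        · simp only [hz, if_false]
          cases hC : probe_map.find? (fun e => e.1 == b_case && PySem.Str.upper e.2.1 == PySem.Str.upper probe_raw) with
          | some c => simp
          | none =>
            simp only [Option.map_none]
            cases hids : (((sub_to_probes.find? (fun e => e.1 == s)).map (·.2)).getD []) with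
            | nil => simp
            | cons a t => cases t <;> simp
      | none =>
        simp only [Option.map_none]
        cases hC : probe_map.find? (fun e => e.1 == b_case && PySem.Str.upper e.2.1 == PySem.Str.upper probe_raw) with
        | some c => simp
        | none =>
          simp only [Option.map_none]
          cases hids : (((sub_to_probes.find? (fun e => e.1 == s)).map (·.2)).getD []) with
          | nil => simp
          | cons a t => cases t <;> simp

lemma candS_snd (b_case probe_raw : String) (submission_map : List (String × Int)) (probe_map : List (String × String × Int)) (sub_to_probes : List (Int × List Int)) (r : Option Int × Option Int) (h : candS b_case probe_raw submission_map probe_map sub_to_probes = some r) : r.2.isSome := by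
  unfold candS at h
  cases hs : lookupSub submission_map b_case with
  | none => rw [hs] at h; exact absurd h (by simp)
  | some s =>
    rw [hs] at h
    simp only at h
    split at h
    · exact Option.some_inj.mp h ▸ rfl
    · exact absurd h (by simp)

lemma mapped_snd (sm : List (String × Int)) (o : Option (String × Int)) (a : Option Int) (b : Option Int)
    (h : o.map (fun e => (lookupSub sm e.1, some e.2)) = some (a, b)) : b.isSome := by
  cases o with
  | none => exact absurd h (by simp)
  | some e =>
    simp only [Option.map_some, Option.some_inj] at h
    rw [← (Prod.mk.injEq _ _ _ _ |>.mp h).2]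
    rfl

-- the era or-chain over candidates equals A's firstHit dispatch
lemma bridge (y : Int) (cS cD cC : Option (Option Int × Option Int)) (s0 : Option Int)
    (hS : ∀ a b, cS = some (a, b) → b.isSome)
    (hD : ∀ a b, cD = some (a, b) → b.isSome)
    (hC : ∀ a b, cC = some (a, b) → b.isSome) :
    firstHit (if y ≤ 2011 then [cS.getD (s0, none), cD.getD (none, none)]
              else if y ≤ 2017 then [cD.getD (none, none), cS.getD (s0, none), cC.getD (none, none)]
              else [cC.getD (none, none), cD.getD (none, none)]) (s0, none)
      = (if y ≤ 2011 then cS.or cD else if y ≤ 2017 then cD.or (cS.or cC) else cC.or cD).getD (s0, none) := by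
  have hS' : ∀ r, cS = some r → r.2.isSome := fun r h => hS r.1 r.2 (by rwa [Prod.mk.eta])
  have hD' : ∀ r, cD = some r → r.2.isSome := fun r h => hD r.1 r.2 (by rwa [Prod.mk.eta])
  have hC' : ∀ r, cC = some r → r.2.isSome := fun r h => hC r.1 r.2 (by rwa [Prod.mk.eta])
  split_ifs <;>
    rcases hcs : cS with _ | ⟨a1, b1⟩ <;>
    rcases hcd : cD with _ | ⟨a2, b2⟩ <;>
    rcases hcc : cC with _ | ⟨a3, b3⟩ <;>
    (try obtain ⟨v1, rfl⟩ := Option.isSome_iff_exists.mp (hS' _ hcs)) <;>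
    (try obtain ⟨v2, rfl⟩ := Option.isSome_iff_exists.mp (hD' _ hcd)) <;>
    (try obtain ⟨v3, rfl⟩ := Option.isSome_iff_exists.mp (hC' _ hcc)) <;>
    simp [firstHit]

set_option maxHeartbeats 1000000 in
-- ===== VERDICT (by name: the statement is the Claim_ definition above) =====
theorem resolve_probe_for_scan_spec : Claim_equal_resolve_probe_for_scan := by
  intro b_case probe_raw submission_map probe_map sub_to_probes _
  show resolve_probe_for_scan _ _ _ _ _ = resolve_probe_for_scan_alt _ _ _ _ _
  simp only [resolve_probe_for_scan, resolve_probe_for_scan_alt, bScan_eq,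
    aSubMatch_eq_candS, aDirect_eq, aComposite_eq]
  rw [bridge _ _ _ _ _ (fun a b h => candS_snd _ _ _ _ _ _ h)
        (fun a b h => mapped_snd _ _ _ _ h) (fun a b h => mapped_snd _ _ _ _ h)]
  rfl
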